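-- pv_equiv track=rewrite | github.com/Karpman-Consulting/eQUEST-229RPDGenerator | test/full_rpd_test/run_full_rpd_tests.py | match_pumps_by_references
-- ===== SOURCE A (Python) =====
-- def match_pumps_by_references(generated_values, reference_values, object_id_map):
--     """Match generated and reference pumps based on references to the loops that they serve."""
--     mapping = {}
--     for generated_object in generated_values:
--         generated_loop_id = generated_object.get("loop_or_piping")
--         if generated_loop_id:
--             reference_loop_id = object_id_map.get(generated_loop_id)
--             if reference_loop_id:
--                 best_match = next(
--                     reference_value
--                     for reference_value in reference_values
--                     if reference_value.get("loop_or_piping") == reference_loop_id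
--                 )
--                 if best_match:
--                     mapping[generated_object.get("id")] = best_match
--                     reference_values.pop(reference_values.index(best_match))
--
--     return mapping
-- ===== SOURCE B (Python) =====
-- def match_pumps_by_references(generated_values, reference_values, object_id_map):
--     """Match generated and reference pumps based on references to the loops that they serve."""
--     # One pass over reference_values: queue of (index, reference) per served loop id.
--     queues = {}
--     for idx, reference in enumerate(reference_values):
--         loop_id = reference.get("loop_or_piping")
--         if loop_id:
--             queues.setdefault(loop_id, []).append((idx, reference))
--     mapping = {}
--     consumed = []
--     for generated_object in generated_values:
--         generated_loop_id = generated_object.get("loop_or_piping")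
--         if not generated_loop_id:
--             continue
--         reference_loop_id = object_id_map.get(generated_loop_id)
--         if not reference_loop_id:
--             continue
--         queue = queues.get(reference_loop_id)
--         if queue:
--             idx, reference = queue.pop(0)
--             mapping[generated_object.get("id")] = reference
--             consumed.append(idx)
--     # Same in-place effect as A: matched references are removed from reference_values.
--     for idx in sorted(consumed, reverse=True):
--         reference_values.pop(idx)
--     return mapping
-- ===== Notes on version B (the rewrite author's own statement) =====
-- stated objective: alternative
-- what changed: Instead of rescanning reference_values with next(...)/index()/pop() for every generated pump, B builds in one pass a dict mapping each served loop id to a queue of (index, reference) pairs and pops the first queue entry per generated pump, deleting the consumed indices from reference_values at the end.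
import Mathlib
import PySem

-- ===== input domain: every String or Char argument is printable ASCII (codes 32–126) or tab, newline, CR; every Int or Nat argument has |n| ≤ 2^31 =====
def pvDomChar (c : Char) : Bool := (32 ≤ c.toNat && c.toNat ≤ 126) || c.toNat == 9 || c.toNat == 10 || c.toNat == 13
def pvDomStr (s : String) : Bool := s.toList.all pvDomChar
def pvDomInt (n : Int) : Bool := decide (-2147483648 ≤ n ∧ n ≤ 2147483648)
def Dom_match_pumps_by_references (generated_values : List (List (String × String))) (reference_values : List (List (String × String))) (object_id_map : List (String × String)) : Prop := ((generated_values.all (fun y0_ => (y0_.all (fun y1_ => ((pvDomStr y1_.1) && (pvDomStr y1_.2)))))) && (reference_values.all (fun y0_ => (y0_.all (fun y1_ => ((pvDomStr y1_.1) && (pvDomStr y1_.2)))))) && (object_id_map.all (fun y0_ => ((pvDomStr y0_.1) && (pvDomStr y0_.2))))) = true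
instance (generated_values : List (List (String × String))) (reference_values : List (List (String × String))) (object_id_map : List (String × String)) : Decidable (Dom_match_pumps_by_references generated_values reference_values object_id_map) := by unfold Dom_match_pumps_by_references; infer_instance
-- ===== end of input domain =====

-- B replaces A's per-pump scan of reference_values (next/index/pop) by a dict of per-loop-id queues
-- built in one pass, popping the first queue entry per pump (objective: alternative). Python A and B
-- both pop matched references out of the reference_values argument in place (same mutation); the
-- theorems here are about the return value.

-- ===== PORT A =====
-- step of A's 'for generated_object in generated_values' loop; state = (mapping, current reference_values)
def pvAStep (object_id_map : List (String × String))
    (st : PySem.Dict String (List (String × String)) × List (List (String × String)))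
    (g : List (String × String)) :
    PySem.Dict String (List (String × String)) × List (List (String × String)) :=
  match (PySem.Dict.mk g).get? "loop_or_piping" with
  | none => st
  | some gl =>
    if gl = "" then st else              -- 'if generated_loop_id:'
    match (PySem.Dict.mk object_id_map).get? gl with
    | none => st
    | some rl =>
      if rl = "" then st else            -- 'if reference_loop_id:'
      match st.2.find? (fun rv => (PySem.Dict.mk rv).get? "loop_or_piping" == some rl) with
      | none => st                       -- Python's next(...) raises StopIteration here; excluded by Pre_
      | some bm =>
        if bm ≠ [] then                  -- 'if best_match:'
          let mapping' :=
            match (PySem.Dict.mk g).get? "id" with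
            | some k => st.1.insert k bm
            | none => st.1               -- Python would key the dict by None (not a String); excluded by Pre_
          let refs' :=
            match PySem.List.index? st.2 bm with
            | some i =>
              match PySem.List.pop? st.2 (i : Int) with
              | some p => p.2
              | none => st.2
            | none => st.2
          (mapping', refs')
        else st

def match_pumps_by_references (generated_values : List (List (String × String))) (reference_values : List (List (String × String))) (object_id_map : List (String × String)) : List (String × List (String × String)) :=
  (generated_values.foldl (pvAStep object_id_map) (PySem.Dict.empty, reference_values)).1.items

-- ===== PORT B =====
-- build step: queues.setdefault(loop_id, []).append((idx, reference))
def pvBQueueStep (qs : PySem.Dict String (List (Int × List (String × String))))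
    (p : Int × List (String × String)) :
    PySem.Dict String (List (Int × List (String × String))) :=
  match (PySem.Dict.mk p.2).get? "loop_or_piping" with
  | none => qs
  | some l => if l = "" then qs else qs.modify l [] (· ++ [p])

-- step of B's main loop; state = (mapping, queues, consumed)
def pvBStep (object_id_map : List (String × String))
    (st : PySem.Dict String (List (String × String)) × PySem.Dict String (List (Int × List (String × String))) × List Int)
    (g : List (String × String)) :
    PySem.Dict String (List (String × String)) × PySem.Dict String (List (Int × List (String × String))) × List Int :=
  match (PySem.Dict.mk g).get? "loop_or_piping" with
  | none => st
  | some gl =>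
    if gl = "" then st else
    match (PySem.Dict.mk object_id_map).get? gl with
    | none => st
    | some rl =>
      if rl = "" then st else
      match st.2.1.getD rl [] with       -- 'queue = queues.get(reference_loop_id)' / 'if queue:'
      | [] => st
      | q :: rest =>                     -- 'idx, reference = queue.pop(0)'
        ((match (PySem.Dict.mk g).get? "id" with
          | some k => st.1.insert k q.2
          | none => st.1),               -- Python would key the dict by None; excluded by Pre_
         st.2.1.insert rl rest,
         st.2.2 ++ [q.1])

def match_pumps_by_references_alt (generated_values : List (List (String × String))) (reference_values : List (List (String × String))) (object_id_map : List (String × String)) : List (String × List (String × String)) :=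
  let queues := (PySem.List.enumerate reference_values).foldl pvBQueueStep PySem.Dict.empty
  -- Source B's final 'for idx in sorted(consumed, reverse=True): reference_values.pop(idx)' only mutates
  -- the argument and does not affect the return value, so it has no counterpart here
  ((generated_values.foldl (pvBStep object_id_map) (PySem.Dict.empty, queues, [])).1).items

-- ===== PRECONDITION & SPEC =====
-- the 'generated_loop_id → reference_loop_id' lookup chain of both Pythons (some r only for truthy r)
def pvChain (object_id_map : List (String × String)) (g : List (String × String)) : Option String :=
  match (PySem.Dict.mk g).get? "loop_or_piping" with
  | none => none
  | some gl =>
    if gl = "" then none else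
    match (PySem.Dict.mk object_id_map).get? gl with
    | none => none
    | some rl => if rl = "" then none else some rl

-- Pre_ excludes (a) inputs where some reference loop id is demanded by more generated pumps than there
-- are references serving it — Python A raises StopIteration there — and (b) inputs where a matched
-- generated pump has no "id" key, where A returns a dict keyed by None, which is not a String.
def Pre_match_pumps_by_references (generated_values : List (List (String × String))) (reference_values : List (List (String × String))) (object_id_map : List (String × String)) : Prop :=
  ∀ g ∈ generated_values, ∀ r ∈ (pvChain object_id_map g).toList,
    (generated_values.countP (fun g' => pvChain object_id_map g' == some r)
      ≤ reference_values.countP (fun rv => (PySem.Dict.mk rv).get? "loop_or_piping" == some r))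
    ∧ (PySem.Dict.mk g).get? "id" ≠ none
instance (generated_values : List (List (String × String))) (reference_values : List (List (String × String))) (object_id_map : List (String × String)) : Decidable (Pre_match_pumps_by_references generated_values reference_values object_id_map) := by unfold Pre_match_pumps_by_references; infer_instance

def pvWitness_match_pumps_by_references : (List (List (String × String))) × (List (List (String × String))) × (List (String × String)) :=
  ([[("loop_or_piping", "L1"), ("id", "P1")]], [[("loop_or_piping", "R1"), ("id", "RP1")]], [("L1", "R1")])

def Spec_match_pumps_by_references (generated_values : List (List (String × String))) (reference_values : List (List (String × String))) (object_id_map : List (String × String)) (out : List (String × List (String × String))) : Prop := out = match_pumps_by_references_alt generated_values reference_values object_id_map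
instance (generated_values : List (List (String × String))) (reference_values : List (List (String × String))) (object_id_map : List (String × String)) (out : List (String × List (String × String))) : Decidable (Spec_match_pumps_by_references generated_values reference_values object_id_map out) := by unfold Spec_match_pumps_by_references; infer_instance

-- ===== CLAIM (what is proved, stated in full; the proofs are below) =====
def Claim_equal_match_pumps_by_references : Prop := ∀ (generated_values : List (List (String × String))) (reference_values : List (List (String × String))) (object_id_map : List (String × String)), Dom_match_pumps_by_references generated_values reference_values object_id_map → Pre_match_pumps_by_references generated_values reference_values object_id_map → Spec_match_pumps_by_references generated_values reference_values object_id_map (match_pumps_by_references generated_values reference_values object_id_map)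
-- ===== LEMMAS AND PROOFS =====
-- the loop invariant: for every truthy loop id r, the queue at r holds exactly (indices paired with)
-- the remaining references serving r, in order
def pvInv (refs : List (List (String × String)))
    (qs : PySem.Dict String (List (Int × List (String × String)))) : Prop :=
  ∀ r : String, r ≠ "" →
    ((qs.getD r []).map Prod.snd)
      = refs.filter (fun rv => (PySem.Dict.mk rv).get? "loop_or_piping" == some r)

theorem pvQueues_build : ∀ (l : List (Int × List (String × String)))
    (qs : PySem.Dict String (List (Int × List (String × String)))) (r : String), r ≠ "" →
    (((l.foldl pvBQueueStep qs).getD r []).map Prod.snd)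
      = ((qs.getD r []).map Prod.snd)
        ++ (l.map Prod.snd).filter (fun rv => (PySem.Dict.mk rv).get? "loop_or_piping" == some r) := by
  intro l
  induction l with
  | nil => intro qs r hr; simp
  | cons p l ih =>
    intro qs r hr
    simp only [List.foldl_cons, List.map_cons, List.filter_cons]
    rw [ih _ r hr]
    unfold pvBQueueStep
    cases hp : (PySem.Dict.mk p.2).get? "loop_or_piping" with
    | none => simp
    | some l0 =>
      by_cases h0 : l0 = ""
      · subst h0
        have : ((some "" : Option String) == some r) = false := by
          simp [Ne.symm hr]
        simp [this]
      · simp only [h0, ite_false]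
        by_cases hrl : r = l0
        · subst hrl
          rw [PySem.Dict.getD_modify_self]
          simp
        · rw [PySem.Dict.getD_modify_of_ne qs [] (· ++ [p]) hrl]
          have : ((some l0 : Option String) == some r) = false := by
            simp [Ne.symm hrl]
          simp [this]

theorem pvInv_init (rv : List (List (String × String))) :
    pvInv rv ((PySem.List.enumerate rv).foldl pvBQueueStep PySem.Dict.empty) := by
  intro r hr
  rw [pvQueues_build _ _ r hr]
  simp [PySem.List.map_snd_enumerate]

theorem pvStep_eq (oim : List (String × String))
    (m : PySem.Dict String (List (String × String)))
    (refs : List (List (String × String)))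
    (qs : PySem.Dict String (List (Int × List (String × String)))) (c : List Int)
    (g : List (String × String)) (h : pvInv refs qs) :
    (pvAStep oim (m, refs) g).1 = (pvBStep oim (m, qs, c) g).1
      ∧ pvInv (pvAStep oim (m, refs) g).2 (pvBStep oim (m, qs, c) g).2.1 := by
  unfold pvAStep pvBStep
  cases hgl : (PySem.Dict.mk g).get? "loop_or_piping" with
  | none => exact ⟨rfl, h⟩
  | some gl =>
  simp only
  by_cases h1 : gl = ""
  · simp only [h1, ite_true]; exact ⟨by trivial, h⟩
  simp only [h1, ite_false]
  cases hrl' : (PySem.Dict.mk oim).get? gl with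
  | none => exact ⟨rfl, h⟩
  | some rl =>
  simp only
  by_cases h2 : rl = ""
  · simp only [h2, ite_true]; exact ⟨by trivial, h⟩
  simp only [h2, ite_false]
  have hq := h rl h2
  cases hf : refs.find? (fun rv => (PySem.Dict.mk rv).get? "loop_or_piping" == some rl) with
  | none =>
    have hfil : refs.filter (fun rv => (PySem.Dict.mk rv).get? "loop_or_piping" == some rl) = [] := by
      rw [List.filter_eq_nil_iff]
      exact fun a ha => by simpa using List.find?_eq_none.mp hf a ha
    have : qs.getD rl [] = [] := by
      have := hq.trans hfil
      simpa using this
    rw [this]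
    exact ⟨rfl, h⟩
  | some bm =>
    rw [List.find?_eq_some_iff_append] at hf
    obtain ⟨hpred, as, bs, hsplit, hfail⟩ := hf
    have hbm : (PySem.Dict.mk bm).get? "loop_or_piping" = some rl := by simpa using hpred
    have hfail' : ∀ x ∈ as, ((PySem.Dict.mk x).get? "loop_or_piping" == some rl) = false := by
      intro x hx; simpa using hfail x hx
    have hfil : refs.filter (fun rv => (PySem.Dict.mk rv).get? "loop_or_piping" == some rl)
        = bm :: bs.filter (fun rv => (PySem.Dict.mk rv).get? "loop_or_piping" == some rl) := by
      rw [hsplit, List.filter_append, List.filter_eq_nil_iff.mpr (fun a ha => by simp [hfail' a ha])]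
      simp [hpred]
    -- the queue at rl is nonempty and starts with bm
    cases hqr : qs.getD rl [] with
    | nil => rw [hqr] at hq; rw [hfil] at hq; simp at hq
    | cons q rest =>
      rw [hqr] at hq; rw [hfil] at hq
      simp only [List.map_cons, List.cons.injEq] at hq
      obtain ⟨hq2, hrest⟩ := hq
      have hbmne : bm ≠ [] := by
        intro he; rw [he] at hbm; simp [pysem] at hbm
      simp only [hbmne, ne_eq, not_false_iff, ite_true]
      have hnm : bm ∉ as := by
        intro hmem
        have := hfail' bm hmem
        simp [hbm] at this
      have hidx : PySem.List.index? refs bm = some as.length := by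
        rw [PySem.List.index?_eq_some_iff]; exact ⟨as, bs, hsplit, rfl, hnm⟩
      have hlen : as.length < refs.length := by
        rw [hsplit, List.length_append, List.length_cons]; omega
      have hpop : PySem.List.pop? refs (as.length : Int) = some (refs[as.length], refs.eraseIdx as.length) :=
        PySem.List.pop?_natCast refs as.length hlen
      have herase : refs.eraseIdx as.length = as ++ bs := by
        rw [hsplit]
        simp [List.eraseIdx_append_of_length_le (le_refl as.length)]
      rw [hidx]
      simp only [hpop, herase]
      constructor
      · -- mappings agree: both insert bm (= q.2) under the same key
        cases (PySem.Dict.mk g).get? "id" with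
        | none => rfl
        | some k => simp [hq2]
      · -- invariant is preserved
        intro r hr
        by_cases hrrl : r = rl
        · subst hrrl
          rw [PySem.Dict.getD_insert_self qs r rest []]
          rw [List.filter_append, List.filter_eq_nil_iff.mpr (fun a ha => by simp [hfail' a ha]),
            List.nil_append]
          exact hrest
        · rw [PySem.Dict.getD_insert_of_ne qs rest [] hrrl]
          have hbmr : ((PySem.Dict.mk bm).get? "loop_or_piping" == some r) = false := by
            simp [hbm, Ne.symm hrrl]
          have := h r hr
          rw [hsplit] at this
          rw [this]
          simp [List.filter_append, hbmr]

theorem pvLoops_eq (oim : List (String × String)) :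
    ∀ (gv : List (List (String × String))) m refs qs c, pvInv refs qs →
      (gv.foldl (pvAStep oim) (m, refs)).1 = (gv.foldl (pvBStep oim) (m, qs, c)).1 := by
  intro gv
  induction gv with
  | nil => intro m refs qs c _; rfl
  | cons g gv ih =>
    intro m refs qs c h
    have hs := pvStep_eq oim m refs qs c g h
    simp only [List.foldl_cons]
    have h1 : pvBStep oim (m, qs, c) g
        = ((pvAStep oim (m, refs) g).1, (pvBStep oim (m, qs, c) g).2.1, (pvBStep oim (m, qs, c) g).2.2) := by
      rw [hs.1]
    rw [h1]
    exact ih (pvAStep oim (m, refs) g).1 (pvAStep oim (m, refs) g).2 _ _ hs.2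

-- ===== VERDICT (by name: the statement is the Claim_ definition above) =====
theorem match_pumps_by_references_spec : Claim_equal_match_pumps_by_references := by
  intro gv rv oim _ _
  unfold Spec_match_pumps_by_references match_pumps_by_references match_pumps_by_references_alt
  rw [pvLoops_eq oim gv PySem.Dict.empty rv _ [] (pvInv_init rv)]
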